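-- pv_equiv track=rewrite | github.com/sfmalloy/everybody-codes | events/2024/quest02/p2.py | solve
-- ===== SOURCE A (Python) =====
-- def solve(words: str, inscriptions: list[str]):
--     def total_runes(runes: str, line: str):
--         indices = set()
--         for rune in runes:
--             index = line.find(rune)
--             while index != -1:
--                 indices |= {i for i in range(index, index+len(rune))}
--                 index = line.find(rune, index+1)
--         return indices
--
--     total = 0
--     for line in inscriptions:
--         indices = total_runes(words, line) | total_runes([''.join(reversed(word)) for word in words], line)
--         total += len(indices)
--     return total
-- ===== SOURCE B (Python) =====
-- def solve(words, inscriptions):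
--     patterns = [p for w in words for p in (w, w[::-1])]
--     total = 0
--     for line in inscriptions:
--         total += sum(
--             1 for i in range(len(line))
--             if any(line.startswith(p, s)
--                    for p in patterns
--                    for s in range(max(0, i - len(p) + 1), i + 1)))
--     return total
-- ===== Notes on version B (the rewrite author's own statement) =====
-- stated objective: faster
-- what changed: B counts covered positions directly — for each index of the line it tests with short-circuiting any() whether some pattern (word or reversed word) starts at a feasible offset covering it — instead of A's repeated str.find occurrence enumeration that unions an index set per occurrence.
import Mathlib
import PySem

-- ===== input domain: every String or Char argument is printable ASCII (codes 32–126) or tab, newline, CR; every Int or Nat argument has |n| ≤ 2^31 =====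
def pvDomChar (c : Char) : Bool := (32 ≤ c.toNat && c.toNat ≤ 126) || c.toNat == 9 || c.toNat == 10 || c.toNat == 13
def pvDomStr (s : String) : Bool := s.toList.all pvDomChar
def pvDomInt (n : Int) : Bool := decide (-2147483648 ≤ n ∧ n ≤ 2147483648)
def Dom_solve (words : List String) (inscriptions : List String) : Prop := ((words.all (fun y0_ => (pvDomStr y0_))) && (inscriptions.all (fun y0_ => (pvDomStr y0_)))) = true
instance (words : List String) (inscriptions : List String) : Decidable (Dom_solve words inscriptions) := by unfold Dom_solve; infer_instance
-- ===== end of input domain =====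

-- B counts covered positions directly with a short-circuited startswith test per index
-- instead of A's str.find occurrence loops unioning an index set per occurrence
-- (objective: faster; a timing run measured B faster on the generated inputs).

-- ===== PORT A =====
-- the inner 'while index != -1' loop of total_runes; the fuel only makes the recursion
-- total (Python's loop terminates: each find starts past the previous hit)
def solveFindLoop (line rune : List Char) (fuel : Nat) (index : Int)
    (acc : PySem.Set Int) : PySem.Set Int :=
  match fuel with
  | 0 => acc
  | Nat.succ fuel =>
    if index = -1 then acc
    else
      solveFindLoop line rune fuel (PySem.Chars.findFrom line rune (index + 1) none)
        (PySem.Set.union acc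
          (PySem.Set.ofList (PySem.List.pyRange index (index + PySem.Chars.len rune) 1)))

def solveTotalRunes (runes : List (List Char)) (line : List Char) : PySem.Set Int :=
  runes.foldl
    (fun indices rune =>
      solveFindLoop line rune (line.length + 2) (PySem.Chars.find line rune) indices)
    PySem.Set.empty

-- ''.join(reversed(word)) is the reversed string: List.reverse on the characters (exact)
def solve (words : List String) (inscriptions : List String) : Int :=
  inscriptions.foldl
    (fun total line =>
      total + PySem.Set.len
        (PySem.Set.union (solveTotalRunes (words.map String.toList) line.toList)
          (solveTotalRunes (words.map (fun w => w.toList.reverse)) line.toList)))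
    0

-- ===== PORT B =====
-- line.startswith(p, s) for 0 ≤ s is: p is a prefix of line[s:] (exact on this call site)
def solveAltCovered (patterns : List (List Char)) (cs : List Char) (i : Int) : Bool :=
  patterns.any (fun p =>
    (PySem.List.pyRange (max 0 (i - PySem.Chars.len p + 1)) (i + 1) 1).any (fun s =>
      PySem.Chars.startswith (cs.drop s.toNat) p))

def solve_alt (words : List String) (inscriptions : List String) : Int :=
  let patterns := words.flatMap (fun w => [w.toList, w.toList.reverse])
  inscriptions.foldl
    (fun total line =>
      total + (PySem.List.pyRange 0 (PySem.Chars.len line.toList) 1).foldl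
        (fun acc i => if solveAltCovered patterns line.toList i then acc + 1 else acc) 0)
    0

-- ===== PRECONDITION & SPEC =====
def Spec_solve (words : List String) (inscriptions : List String) (out : Int) : Prop := out = solve_alt words inscriptions
instance (words : List String) (inscriptions : List String) (out : Int) : Decidable (Spec_solve words inscriptions out) := by unfold Spec_solve; infer_instance

-- ===== CLAIM (what is proved, stated in full; the proofs are below) =====
def Claim_equal_solve : Prop := ∀ (words : List String) (inscriptions : List String), Dom_solve words inscriptions → Spec_solve words inscriptions (solve words inscriptions)

-- ===== LEMMAS AND PROOFS =====

-- index i of cs is covered by an occurrence of pattern p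
def pvCovers (cs p : List Char) (i : Int) : Prop :=
  ∃ s : Nat, p <+: cs.drop s ∧ (s : Int) ≤ i ∧ i < (s : Int) + p.length

theorem solveAltCovered_iff (patterns : List (List Char)) (cs : List Char) (i : Int) :
    solveAltCovered patterns cs i = true ↔ ∃ p ∈ patterns, pvCovers cs p i := by
  unfold solveAltCovered pvCovers
  simp only [List.any_eq_true, PySem.List.mem_pyRange_one, PySem.Chars.startswith_iff,
    PySem.Chars.len_eq]
  constructor
  · rintro ⟨p, hp, s, ⟨hs1, hs2⟩, hpre⟩
    exact ⟨p, hp, s.toNat, hpre, by omega, by omega⟩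
  · rintro ⟨p, hp, s, hpre, hs1, hs2⟩
    refine ⟨p, hp, (s : Int), ⟨by omega, by omega⟩, ?_⟩
    rwa [Int.toNat_natCast]

theorem solveFindLoop_empty_mem (cs : List Char) (fuel : Nat) (index : Int)
    (acc : PySem.Set Int) (i : Int) :
    i ∈ solveFindLoop cs [] fuel index acc ↔ i ∈ acc := by
  induction fuel generalizing index acc with
  | zero => simp [solveFindLoop]
  | succ n ih =>
      simp only [solveFindLoop]
      split
      · exact Iff.rfl
      · rw [ih]
        simp only [PySem.Set.mem_union, PySem.Set.mem_ofList, PySem.List.mem_pyRange_one,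
          PySem.Chars.len_eq, List.length_nil]
        constructor
        · rintro (h | h)
          · exact h
          · omega
        · exact Or.inl

theorem solveFindLoop_mem (cs rune : List Char) (hm : rune ≠ []) :
    ∀ (fuel k : Nat) (acc : PySem.Set Int), k ≤ cs.length → cs.length - k < fuel →
    ∀ i, i ∈ solveFindLoop cs rune fuel (PySem.Chars.findFrom cs rune (k : Int) none) acc ↔
      i ∈ acc ∨ ∃ s : Nat, k ≤ s ∧ rune <+: cs.drop s ∧ (s : Int) ≤ i ∧ i < (s : Int) + rune.length := by
  intro fuel
  induction fuel with
  | zero => intro k acc hk hf; omega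
  | succ n ih =>
      intro k acc hk hf i
      by_cases hj : PySem.Chars.findFrom cs rune (k : Int) none = -1
      · simp only [solveFindLoop, hj, if_pos]
        constructor
        · exact Or.inl
        · rintro (h | ⟨s, hks, hpre, _, _⟩)
          · exact h
          · exfalso
            have hnin := (PySem.Chars.findFrom_natCast_eq_neg_one_iff cs rune k hk).mp hj
            apply hnin
            have hsuf : cs.drop s <:+ cs.drop k := by
              have : cs.drop s = (cs.drop k).drop (s - k) := by
                rw [List.drop_drop]; congr 1; omega
              rw [this]; exact List.drop_suffix _ _
            exact hpre.isInfix.trans hsuf.isInfix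
      · obtain ⟨hkj, hpre, hmin⟩ := PySem.Chars.findFrom_natCast_spec cs rune k hk hj
        set j := PySem.Chars.findFrom cs rune (k : Int) none with hjdef
        have hj0 : (0 : Int) ≤ j := le_trans (by omega) hkj
        have hrlen : rune.length ≤ cs.length - j.toNat := by
          have := hpre.length_le
          simpa using this
        have hrpos : 0 < rune.length := List.length_pos_iff.mpr hm
        have hjlen : j.toNat < cs.length := by omega
        simp only [solveFindLoop, if_neg hj]
        have hcast : j + 1 = ((j.toNat + 1 : Nat) : Int) := by omega
        rw [hcast, ih (j.toNat + 1) _ (by omega) (by omega)]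
        simp only [PySem.Set.mem_union, PySem.Set.mem_ofList, PySem.List.mem_pyRange_one,
          PySem.Chars.len_eq]
        constructor
        · rintro ((h | h) | ⟨s, hks, hpre2, hb1, hb2⟩)
          · exact Or.inl h
          · exact Or.inr ⟨j.toNat, by omega, hpre, by omega, by omega⟩
          · exact Or.inr ⟨s, by omega, hpre2, hb1, hb2⟩
        · rintro (h | ⟨s, hks, hpre2, hb1, hb2⟩)
          · exact Or.inl (Or.inl h)
          · rcases lt_trichotomy s j.toNat with hlt | heq | hgt
            · exact absurd hpre2 (hmin s hks hlt)
            · subst heq; exact Or.inl (Or.inr (by omega))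
            · exact Or.inr ⟨s, by omega, hpre2, hb1, hb2⟩

theorem solveFindLoop_nodup (cs rune : List Char) (fuel : Nat) (index : Int)
    (acc : PySem.Set Int) (h : acc.Nodup) : (solveFindLoop cs rune fuel index acc).Nodup := by
  induction fuel generalizing index acc with
  | zero => exact h
  | succ n ih =>
      simp only [solveFindLoop]
      split
      · exact h
      · exact ih _ _ (PySem.Set.nodup_union _ _ h)

theorem solveTotalRunes_fold_mem (runes : List (List Char)) (cs : List Char)
    (acc : PySem.Set Int) (i : Int) :
    i ∈ runes.foldl
        (fun indices rune =>
          solveFindLoop cs rune (cs.length + 2) (PySem.Chars.find cs rune) indices) acc ↔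
      i ∈ acc ∨ ∃ rune ∈ runes, pvCovers cs rune i := by
  induction runes generalizing acc with
  | nil => simp
  | cons r rs ih =>
      simp only [List.foldl_cons, ih, List.mem_cons]
      have hstep : i ∈ solveFindLoop cs r (cs.length + 2) (PySem.Chars.find cs r) acc ↔
          i ∈ acc ∨ pvCovers cs r i := by
        rcases eq_or_ne r [] with rfl | hr
        · rw [solveFindLoop_empty_mem]
          unfold pvCovers
          simp only [List.nil_prefix, true_and, List.length_nil]
          constructor
          · exact Or.inl
          · rintro (h | ⟨s, h1, h2⟩); · exact h
            omega
        · rw [← PySem.Chars.findFrom_zero, show (0 : Int) = ((0 : Nat) : Int) from rfl,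
            solveFindLoop_mem cs r hr (cs.length + 2) 0 acc (by omega) (by omega)]
          unfold pvCovers
          simp only [Nat.zero_le, true_and]
      rw [hstep]
      constructor
      · rintro ((h | h) | h)
        · exact Or.inl h
        · exact Or.inr ⟨r, Or.inl rfl, h⟩
        · obtain ⟨rn, h1, h2⟩ := h
          exact Or.inr ⟨rn, Or.inr h1, h2⟩
      · rintro (h | ⟨rn, (rfl | h1), h2⟩)
        · exact Or.inl (Or.inl h)
        · exact Or.inl (Or.inr h2)
        · exact Or.inr ⟨rn, h1, h2⟩

theorem solveTotalRunes_mem (runes : List (List Char)) (cs : List Char) (i : Int) :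
    i ∈ solveTotalRunes runes cs ↔ ∃ rune ∈ runes, pvCovers cs rune i := by
  unfold solveTotalRunes
  rw [solveTotalRunes_fold_mem]
  simp [PySem.Set.empty]

theorem solveTotalRunes_fold_nodup (runes : List (List Char)) (cs : List Char)
    (acc : PySem.Set Int) (h : acc.Nodup) :
    (runes.foldl
      (fun indices rune =>
        solveFindLoop cs rune (cs.length + 2) (PySem.Chars.find cs rune) indices) acc).Nodup := by
  induction runes generalizing acc with
  | nil => exact h
  | cons r rs ih => exact ih _ (solveFindLoop_nodup _ _ _ _ _ h)

theorem solveTotalRunes_nodup (runes : List (List Char)) (cs : List Char) :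
    (solveTotalRunes runes cs).Nodup := by
  exact solveTotalRunes_fold_nodup runes cs _ List.nodup_nil

theorem pvCovers_bounds (cs p : List Char) (i : Int) (h : pvCovers cs p i) :
    0 ≤ i ∧ i < (cs.length : Int) := by
  obtain ⟨s, hpre, h1, h2⟩ := h
  have := hpre.length_le
  simp only [List.length_drop] at this
  omega

theorem pvCountFold (p : Int → Bool) (l : List Int) (acc : Int) :
    l.foldl (fun a i => if p i then a + 1 else a) acc = acc + (l.filter p).length := by
  induction l generalizing acc with
  | nil => simp
  | cons x xs ih =>
      simp only [List.foldl_cons, List.filter_cons]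
      by_cases hx : p x
      · simp only [hx, if_pos, ih]
        simp
        omega
      · simp [hx, ih]

theorem solve_line_eq (words : List String) (line : String) :
    PySem.Set.len
      (PySem.Set.union (solveTotalRunes (words.map String.toList) line.toList)
        (solveTotalRunes (words.map (fun w => w.toList.reverse)) line.toList)) =
    (PySem.List.pyRange 0 (PySem.Chars.len line.toList) 1).foldl
      (fun acc i => if solveAltCovered (words.flatMap (fun w => [w.toList, w.toList.reverse])) line.toList i then acc + 1 else acc) 0 := by
  rw [pvCountFold]
  have hnd : (PySem.Set.union (solveTotalRunes (words.map String.toList) line.toList)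
      (solveTotalRunes (words.map (fun w => w.toList.reverse)) line.toList)).Nodup :=
    PySem.Set.nodup_union _ _ (solveTotalRunes_nodup _ _)
  have hfn : ((PySem.List.pyRange 0 (PySem.Chars.len line.toList) 1).filter
      (fun i => solveAltCovered (words.flatMap (fun w => [w.toList, w.toList.reverse]))
        line.toList i)).Nodup := (PySem.List.nodup_pyRange_one _ _).filter _
  have hperm := (List.perm_ext_iff_of_nodup hnd hfn).2 (fun a => by
    simp only [PySem.Set.mem_union, solveTotalRunes_mem, List.mem_filter,
      PySem.List.mem_pyRange_one, solveAltCovered_iff, List.mem_flatMap, List.mem_map,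
      List.mem_cons, List.not_mem_nil, or_false, PySem.Chars.len_eq]
    constructor
    · rintro (⟨r, ⟨w, hw, rfl⟩, hc⟩ | ⟨r, ⟨w, hw, rfl⟩, hc⟩)
      · have hb := pvCovers_bounds _ _ _ hc
        exact ⟨⟨hb.1, hb.2⟩, w.toList, ⟨w, hw, Or.inl rfl⟩, hc⟩
      · have hb := pvCovers_bounds _ _ _ hc
        exact ⟨⟨hb.1, hb.2⟩, w.toList.reverse, ⟨w, hw, Or.inr rfl⟩, hc⟩
    · rintro ⟨-, r, ⟨w, hw, (rfl | rfl)⟩, hc⟩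
      · exact Or.inl ⟨w.toList, ⟨w, hw, rfl⟩, hc⟩
      · exact Or.inr ⟨w.toList.reverse, ⟨w, hw, rfl⟩, hc⟩)
  unfold PySem.Set.len
  rw [hperm.length_eq]
  simp

-- ===== VERDICT (by name: the statement is the Claim_ definition above) =====
theorem solve_spec : Claim_equal_solve := by
  intro words inscriptions _
  unfold Spec_solve solve solve_alt
  simp only [solve_line_eq]
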